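-- pv_equiv track=rewrite | github.com/Sayantan-coder/Edabith-Hard-level | vowels_to_vowels_link.py | vowels_link
-- ===== SOURCE A (Python) =====
-- def vowels_link(text: str) -> bool:
--     words_list = []
--     i = 0
--     n = len(text)
--     while i < n:
--         while i < n and text[i] == " ":
--             i += 1
--         start = i
--         while i < n and text[i] != " ":
--             i += 1
--         if start < n:
--             word = text[start:i]
--             words_list.append(word)
--     vowels_list = ["a", "e", "i", "o", "u"]
--     for ind in range(len(words_list) - 1):
--         if words_list[ind][-1] in vowels_list and words_list[ind + 1][0] in vowels_list:
--             return True
--     return False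
-- ===== SOURCE B (Python) =====
-- VOWELS = "aeiou"
--
--
-- def vowels_link(text: str) -> bool:
--     # single streaming pass: no word list is built
--     prev = None   # did the previously finished word end in a vowel?
--     cur = None    # None = between words; else: is the last char seen in this word a vowel?
--     found = False
--     for ch in text:
--         if ch == " ":
--             if cur is not None:
--                 prev, cur = cur, None
--         else:
--             if cur is None and prev is True and ch in VOWELS:
--                 found = True
--             cur = ch in VOWELS
--     return found
-- ===== Notes on version B (the rewrite author's own statement) =====
-- stated objective: alternative
-- what changed: A builds a words list with index-based while loops and then scans adjacent pairs with range(len-1); B is a single streaming pass over the characters keeping only three flags (previous word ended in vowel, current word's last char is vowel, found), never materializing the words.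
import Mathlib
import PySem

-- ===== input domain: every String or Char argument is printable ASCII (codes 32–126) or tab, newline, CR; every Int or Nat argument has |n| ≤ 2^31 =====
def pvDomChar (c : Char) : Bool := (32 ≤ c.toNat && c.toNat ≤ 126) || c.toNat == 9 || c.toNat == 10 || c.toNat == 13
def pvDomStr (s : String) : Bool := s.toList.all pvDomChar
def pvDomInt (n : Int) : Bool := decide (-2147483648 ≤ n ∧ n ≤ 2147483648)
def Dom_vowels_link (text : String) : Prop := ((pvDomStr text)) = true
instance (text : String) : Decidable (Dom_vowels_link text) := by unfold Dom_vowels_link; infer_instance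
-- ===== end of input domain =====

-- B replaces A's tokenize-then-scan-pairs with a single streaming pass over the characters
-- keeping only three flags (objective: alternative decomposition, same O(n) cost).

-- ===== PORT A =====
-- literal port of A: index-based while loops building words_list, then a scan over range(len-1)

def vlA_vowels : List Char := ['a', 'e', 'i', 'o', 'u']

-- inner `while i < n and text[i] == " "` (i always guarded by i < n, so getD is exact)
def vlA_skipSpaces (cs : List Char) (n i : Nat) : Nat :=
  if i < n ∧ cs.getD i ' ' = ' ' then vlA_skipSpaces cs n (i + 1) else i
termination_by n - i
decreasing_by omega

-- inner `while i < n and text[i] != " "`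
def vlA_skipWord (cs : List Char) (n i : Nat) : Nat :=
  if i < n ∧ cs.getD i ' ' ≠ ' ' then vlA_skipWord cs n (i + 1) else i
termination_by n - i
decreasing_by omega

theorem vlA_skipSpaces_ge (cs : List Char) (n i : Nat) : i ≤ vlA_skipSpaces cs n i := by
  fun_induction vlA_skipSpaces cs n i with
  | case1 i h ih => omega
  | case2 i h => omega

theorem vlA_skipWord_ge (cs : List Char) (n i : Nat) : i ≤ vlA_skipWord cs n i := by
  fun_induction vlA_skipWord cs n i with
  | case1 i h ih => omega
  | case2 i h => omega

theorem vlA_progress (cs : List Char) (n i : Nat) (h : i < n) :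
    i < vlA_skipWord cs n (vlA_skipSpaces cs n i) := by
  by_cases hc : cs.getD i ' ' = ' '
  · have h1 : vlA_skipSpaces cs n i = vlA_skipSpaces cs n (i + 1) := by
      rw [vlA_skipSpaces, if_pos ⟨h, hc⟩]
    have h2 := vlA_skipSpaces_ge cs n (i + 1)
    have h3 := vlA_skipWord_ge cs n (vlA_skipSpaces cs n i)
    omega
  · have h1 : vlA_skipSpaces cs n i = i := by
      rw [vlA_skipSpaces, if_neg (fun hh => hc hh.2)]
    have h2 : vlA_skipWord cs n i = vlA_skipWord cs n (i + 1) := by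
      rw [vlA_skipWord, if_pos ⟨h, hc⟩]
    have h3 := vlA_skipWord_ge cs n (i + 1)
    rw [h1, h2]
    omega

-- the outer `while i < n` loop; `word = text[start:i]` is PySem.List.slice
def vlA_tokenize (cs : List Char) (n i : Nat) (acc : List (List Char)) : List (List Char) :=
  if h : i < n then
    let start := vlA_skipSpaces cs n i
    let j := vlA_skipWord cs n start
    vlA_tokenize cs n j
      (if start < n then acc ++ [PySem.List.slice cs (some (start : Int)) (some (j : Int))] else acc)
  else acc
termination_by n - i
decreasing_by exact Nat.sub_lt_sub_left h (vlA_progress cs n i h)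

-- one step of `for ind in range(...)`: words are nonempty and indices in range, so pyGetD is exact
def vlA_chk (ws : List (List Char)) (ind : Int) : Bool :=
  vlA_vowels.contains (PySem.List.pyGetD (PySem.List.pyGetD ws ind []) (-1) ' ') &&
  vlA_vowels.contains (PySem.List.pyGetD (PySem.List.pyGetD ws (ind + 1) []) 0 ' ')

-- the `for ind in range(len(words_list) - 1)` loop with its early `return True`
def vlA_scan (ws : List (List Char)) : List Int → Bool
  | [] => false
  | ind :: rest => if vlA_chk ws ind then true else vlA_scan ws rest

def vowels_link (text : String) : Bool :=
  let cs := text.toList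
  let words := vlA_tokenize cs cs.length 0 []
  vlA_scan words (PySem.List.pyRange 0 ((words.length : Int) - 1) 1)

-- ===== PORT B =====
-- literal port of Source B: one pass, state (prev, cur, found)

def vlB_isVow (c : Char) : Bool := "aeiou".toList.contains c  -- `ch in VOWELS`

def vlB_step (s : Option Bool × Option Bool × Bool) (c : Char) : Option Bool × Option Bool × Bool :=
  let (prev, cur, found) := s
  if c = ' ' then
    match cur with
    | some v => (some v, none, found)
    | none => (prev, cur, found)
  else
    let found' := if cur = none ∧ prev = some true ∧ vlB_isVow c = true then true else found
    (prev, some (vlB_isVow c), found')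

def vowels_link_alt (text : String) : Bool :=
  (text.toList.foldl vlB_step (none, none, false)).2.2

-- ===== PRECONDITION & SPEC =====
def Spec_vowels_link (text : String) (out : Bool) : Prop := out = vowels_link_alt text
instance (text : String) (out : Bool) : Decidable (Spec_vowels_link text out) := by unfold Spec_vowels_link; infer_instance

-- ===== CLAIM (what is proved, stated in full; the proofs are below) =====
def Claim_equal_vowels_link : Prop := ∀ (text : String), Dom_vowels_link text → Spec_vowels_link text (vowels_link text)

-- ===== LEMMAS AND PROOFS =====

-- common spec: the nonempty space-separated words, and the pair scan

def vlSp (c : Char) : Bool := c == ' '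
def vlNsp (c : Char) : Bool := !(c == ' ')

def vlFirst (w : List Char) : Char := PySem.List.pyGetD w 0 ' '
def vlLast (w : List Char) : Char := PySem.List.pyGetD w (-1) ' '
def vlVow (c : Char) : Bool := vlA_vowels.contains c

def vlHeadVow : List (List Char) → Bool
  | [] => false
  | w :: _ => vlVow (vlFirst w)

def vlPairs : List (List Char) → Bool
  | [] => false
  | w :: ws => (vlVow (vlLast w) && vlHeadVow ws) || vlPairs ws

theorem vl_head_nsp (l : List Char) (h : l.dropWhile vlSp ≠ []) :
    ∃ c d', l.dropWhile vlSp = c :: d' ∧ vlNsp c = true := by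
  obtain ⟨c, d', hdc⟩ := List.exists_cons_of_ne_nil h
  have hh := List.head_dropWhile_not vlSp h
  simp only [hdc, List.head_cons] at hh
  refine ⟨c, d', hdc, ?_⟩
  simp only [vlNsp, vlSp] at hh ⊢
  simp [hh]

theorem vl_tw_pos (l : List Char) (h : l.dropWhile vlSp ≠ []) :
    0 < ((l.dropWhile vlSp).takeWhile vlNsp).length := by
  obtain ⟨c, d', hdc, hcn⟩ := vl_head_nsp l h
  rw [hdc, List.takeWhile_cons, if_pos hcn]
  simp

theorem vlWords_dec (cs : List Char) (h : cs.dropWhile vlSp ≠ []) :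
    ((cs.dropWhile vlSp).dropWhile vlNsp).length < cs.length := by
  obtain ⟨c, d', hdc, hcn⟩ := vl_head_nsp cs h
  have h1 := List.length_dropWhile_le (p := vlSp) (l := cs)
  rw [hdc] at h1 ⊢
  rw [List.dropWhile_cons, if_pos hcn]
  have h2 := List.length_dropWhile_le (p := vlNsp) (l := d')
  simp at h1
  omega

def vlWords (cs : List Char) : List (List Char) :=
  if h : cs.dropWhile vlSp = [] then []
  else (cs.dropWhile vlSp).takeWhile vlNsp :: vlWords ((cs.dropWhile vlSp).dropWhile vlNsp)
termination_by cs.length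
decreasing_by exact vlWords_dec cs h

theorem vlWords_nil : vlWords [] = [] := by
  rw [vlWords]; simp

-- list facts about takeWhile / dropWhile lengths

theorem vl_take_len_takeWhile {α : Type} (p : α → Bool) (l : List α) :
    l.take (l.takeWhile p).length = l.takeWhile p := by
  induction l with
  | nil => simp
  | cons c l ih =>
    by_cases hp : p c
    · simp [List.takeWhile_cons, hp, ih]
    · simp [List.takeWhile_cons, hp]

theorem vl_drop_len_takeWhile {α : Type} (p : α → Bool) (l : List α) :
    l.drop (l.takeWhile p).length = l.dropWhile p := by
  induction l with
  | nil => simp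
  | cons c l ih =>
    by_cases hp : p c
    · simp [List.takeWhile_cons, List.dropWhile_cons, hp, ih]
    · simp [List.takeWhile_cons, List.dropWhile_cons, hp]

theorem vl_len_take_drop {α : Type} (p : α → Bool) (l : List α) :
    (l.takeWhile p).length + (l.dropWhile p).length = l.length := by
  have h := congrArg List.length (List.takeWhile_append_dropWhile (p := p) (l := l))
  rw [List.length_append] at h
  exact h

-- characterization of the skip loops
theorem vlA_skipSpaces_eq (cs : List Char) (i : Nat) :
    vlA_skipSpaces cs cs.length i = i + ((cs.drop i).takeWhile vlSp).length := by
  fun_induction vlA_skipSpaces cs cs.length i with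
  | case1 i h ih =>
    obtain ⟨hi, hc⟩ := h
    rw [List.drop_eq_getElem_cons hi]
    rw [List.getD_eq_getElem _ _ hi] at hc
    have hb : vlSp (cs[i]'hi) = true := by simp [vlSp, hc]
    rw [List.takeWhile_cons, if_pos hb, List.length_cons, ih]
    omega
  | case2 i h =>
    by_cases hi : i < cs.length
    · have hc : ¬ cs.getD i ' ' = ' ' := fun hc => h ⟨hi, hc⟩
      rw [List.getD_eq_getElem _ _ hi] at hc
      rw [List.drop_eq_getElem_cons hi]
      have hb : ¬ vlSp (cs[i]'hi) = true := by simp [vlSp, hc]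
      rw [List.takeWhile_cons, if_neg hb]
      simp
    · rw [List.drop_of_length_le (by omega)]; simp

theorem vlA_skipWord_eq (cs : List Char) (i : Nat) :
    vlA_skipWord cs cs.length i = i + ((cs.drop i).takeWhile vlNsp).length := by
  fun_induction vlA_skipWord cs cs.length i with
  | case1 i h ih =>
    obtain ⟨hi, hc⟩ := h
    rw [List.drop_eq_getElem_cons hi]
    rw [List.getD_eq_getElem _ _ hi] at hc
    have hb : vlNsp (cs[i]'hi) = true := by simp [vlNsp, hc]
    rw [List.takeWhile_cons, if_pos hb, List.length_cons, ih]
    omega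
  | case2 i h =>
    by_cases hi : i < cs.length
    · have hc : cs.getD i ' ' = ' ' := by by_contra hc; exact h ⟨hi, hc⟩
      rw [List.getD_eq_getElem _ _ hi] at hc
      rw [List.drop_eq_getElem_cons hi]
      have hb : ¬ vlNsp (cs[i]'hi) = true := by simp [vlNsp, hc]
      rw [List.takeWhile_cons, if_neg hb]
      simp
    · rw [List.drop_of_length_le (by omega)]; simp

-- A's tokenizer builds exactly vlWords

theorem vlA_tokenize_eq_aux (m : Nat) : ∀ (cs : List Char) (i : Nat) (acc : List (List Char)),
    cs.length - i ≤ m → vlA_tokenize cs cs.length i acc = acc ++ vlWords (cs.drop i) := by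
  induction m with
  | zero =>
    intro cs i acc hm
    rw [vlA_tokenize, dif_neg (by omega), List.drop_of_length_le (by omega), vlWords_nil]
    simp
  | succ m ih =>
    intro cs i acc hm
    by_cases h : i < cs.length
    · rw [vlA_tokenize, dif_pos h]
      simp only [vlA_skipSpaces_eq, vlA_skipWord_eq]
      have hL : (cs.drop i).length = cs.length - i := by simp
      have hsum := vl_len_take_drop vlSp (cs.drop i)
      have hdd : cs.drop (i + ((cs.drop i).takeWhile vlSp).length) = (cs.drop i).dropWhile vlSp := by
        have h0 := vl_drop_len_takeWhile vlSp (cs.drop i)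
        rwa [List.drop_drop] at h0
      by_cases hde : (cs.drop i).dropWhile vlSp = []
      · have ht1 : ((cs.drop i).takeWhile vlSp).length = cs.length - i := by
          rw [hde] at hsum; simp at hsum; omega
        rw [if_neg (by omega)]
        rw [hdd, hde]
        simp only [List.takeWhile_nil, List.length_nil, Nat.add_zero]
        rw [ih cs (i + ((cs.drop i).takeWhile vlSp).length) acc (by omega)]
        rw [List.drop_of_length_le (by omega)]
        have hw1 : vlWords (cs.drop i) = [] := by rw [vlWords, dif_pos hde]
        rw [vlWords_nil, hw1]
      · have hd'pos : 0 < ((cs.drop i).dropWhile vlSp).length := List.length_pos_of_ne_nil hde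
        have ht1lt : ((cs.drop i).takeWhile vlSp).length < cs.length - i := by omega
        have htw := vl_tw_pos (cs.drop i) hde
        rw [if_pos (by omega)]
        rw [PySem.List.slice_natCast, Nat.add_sub_cancel_left]
        rw [hdd]
        rw [vl_take_len_takeWhile vlNsp]
        have hdd2 : cs.drop (i + ((cs.drop i).takeWhile vlSp).length +
            (((cs.drop i).dropWhile vlSp).takeWhile vlNsp).length) =
            ((cs.drop i).dropWhile vlSp).dropWhile vlNsp := by
          rw [← List.drop_drop, hdd]
          exact vl_drop_len_takeWhile vlNsp _
        rw [ih cs _ _ (by omega), hdd2]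
        have hw : vlWords (cs.drop i) = ((cs.drop i).dropWhile vlSp).takeWhile vlNsp ::
            vlWords (((cs.drop i).dropWhile vlSp).dropWhile vlNsp) := by
          rw [vlWords, dif_neg hde]
        rw [hw]
        simp
    · rw [vlA_tokenize, dif_neg h, List.drop_of_length_le (by omega), vlWords_nil]
      simp

theorem vlA_tokenize_eq (cs : List Char) (i : Nat) (acc : List (List Char)) :
    vlA_tokenize cs cs.length i acc = acc ++ vlWords (cs.drop i) := by
  exact vlA_tokenize_eq_aux cs.length cs i acc (by omega)

-- A's scan loop is the pair predicate

def vlChkN (ws : List (List Char)) (k : Nat) : Bool :=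
  vlVow (vlLast (ws.getD k [])) && vlVow (vlFirst (ws.getD (k + 1) []))

theorem vlA_scan_any (ws : List (List Char)) (l : List Int) :
    vlA_scan ws l = l.any (vlA_chk ws) := by
  induction l with
  | nil => rfl
  | cons ind rest ih =>
    simp only [vlA_scan, List.any_cons, ← ih]
    by_cases h : vlA_chk ws ind <;> simp [h]

theorem vlA_chk_natCast (ws : List (List Char)) (k : Nat) :
    vlA_chk ws (k : Int) = vlChkN ws k := by
  unfold vlA_chk vlChkN vlLast vlFirst vlVow
  rw [show ((k : Int) + 1) = ((k + 1 : Nat) : Int) by push_cast; ring]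
  rw [PySem.List.pyGetD_natCast, PySem.List.pyGetD_natCast]

theorem vlPairs_iff (ws : List (List Char)) :
    vlPairs ws = true ↔ ∃ k : Nat, k + 1 < ws.length ∧ vlChkN ws k = true := by
  induction ws with
  | nil => simp [vlPairs]
  | cons w ws ih =>
    simp only [vlPairs, Bool.or_eq_true, ih]
    constructor
    · rintro (h | ⟨k, hk, hc⟩)
      · refine ⟨0, ?_, ?_⟩
        · cases ws with
          | nil => simp [vlHeadVow] at h
          | cons w2 ws2 => simp
        · cases ws with
          | nil => simp [vlHeadVow] at h
          | cons w2 ws2 => simpa [vlChkN, vlHeadVow] using h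
      · exact ⟨k + 1, by simpa using Nat.succ_lt_succ hk, by simpa [vlChkN] using hc⟩
    · rintro ⟨k, hk, hc⟩
      cases k with
      | zero =>
        left
        cases ws with
        | nil => simp at hk
        | cons w2 ws2 => simpa [vlChkN, vlHeadVow] using hc
      | succ k =>
        right
        exact ⟨k, by simpa using Nat.lt_of_succ_lt_succ hk, by simpa [vlChkN] using hc⟩

theorem vlA_scan_eq_pairs (ws : List (List Char)) :
    vlA_scan ws (PySem.List.pyRange 0 ((ws.length : Int) - 1) 1) = vlPairs ws := by
  rw [vlA_scan_any, Bool.eq_iff_iff, List.any_eq_true, vlPairs_iff]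
  constructor
  · rintro ⟨x, hx, hc⟩
    rw [PySem.List.mem_pyRange_one] at hx
    obtain ⟨hx0, hx1⟩ := hx
    refine ⟨x.toNat, by omega, ?_⟩
    rw [← vlA_chk_natCast]
    rwa [Int.toNat_of_nonneg hx0]
  · rintro ⟨k, hk, hc⟩
    refine ⟨(k : Int), ?_, by rwa [vlA_chk_natCast]⟩
    rw [PySem.List.mem_pyRange_one]
    omega

-- B's streaming pass computes the same pair predicate

theorem vlB_step_space_inword (prev : Option Bool) (v : Bool) (f : Bool) :
    vlB_step (prev, some v, f) ' ' = (some v, none, f) := by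
  simp [vlB_step]

theorem vlB_step_nonspace_inword (prev : Option Bool) (v : Bool) (f : Bool) (c : Char)
    (hc : ¬ c = ' ') : vlB_step (prev, some v, f) c = (prev, some (vlB_isVow c), f) := by
  simp [vlB_step, hc]

theorem vlB_step_nonspace_start (prev : Option Bool) (f : Bool) (c : Char) (hc : ¬ c = ' ') :
    vlB_step (prev, none, f) c =
      (prev, some (vlB_isVow c), f || ((prev == some true) && vlB_isVow c)) := by
  simp only [vlB_step, if_neg hc]
  simp only [eq_self_iff_true, true_and]
  have hcond : (if prev = some true ∧ vlB_isVow c = true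
      then true else f) = (f || ((prev == some true) && vlB_isVow c)) := by
    by_cases hp : prev = some true
    · by_cases hv : vlB_isVow c = true
      · simp [hp, hv]
      · simp [hp, hv, Bool.eq_false_iff.mpr hv]
    · have hb : (prev == some true) = false := by
        cases prev with
        | none => rfl
        | some b => cases b with
          | false => rfl
          | true => exact absurd rfl hp
      simp [hp, hb]
  rw [hcond]

-- inside a word, the fold only updates the last-char-vowel flag
theorem vlB_foldl_word (w : List Char) (hw : ∀ c ∈ w, vlNsp c = true) :
    ∀ (prev : Option Bool) (v : Bool) (f : Bool),
      w.foldl vlB_step (prev, some v, f) =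
        (prev, some (if hne : w = [] then v else vlB_isVow (w.getLast hne)), f) := by
  induction w with
  | nil => intro prev v f; simp
  | cons c w ih =>
    intro prev v f
    have hc : ¬ c = ' ' := by
      have := hw c (List.mem_cons_self ..)
      simp [vlNsp] at this; exact this
    rw [List.foldl_cons, vlB_step_nonspace_inword prev v f c hc,
      ih (fun x hx => hw x (List.mem_cons_of_mem _ hx))]
    cases w with
    | nil => simp
    | cons c2 w2 => simp [List.getLast_cons]

-- spaces between words are no-ops while cur = none
theorem vlB_foldl_spaces (t : List Char) (ht : ∀ c ∈ t, vlSp c = true) (prev : Option Bool) (f : Bool) :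
    t.foldl vlB_step (prev, none, f) = (prev, none, f) := by
  induction t with
  | nil => rfl
  | cons c t ih =>
    have hc : c = ' ' := by
      have := ht c (List.mem_cons_self ..)
      simpa [vlSp] using this
    simp only [List.foldl_cons, vlB_step, hc, if_pos rfl]
    exact ih fun x hx => ht x (List.mem_cons_of_mem _ hx)

theorem vlWords_eq_of_dropWhile_eq (l1 l2 : List Char) (h : l1.dropWhile vlSp = l2.dropWhile vlSp) :
    vlWords l1 = vlWords l2 := by
  conv_lhs => rw [vlWords]
  conv_rhs => rw [vlWords]
  simp only [h]

theorem vlB_main (cs : List Char) :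
    ∀ (prev : Option Bool) (f : Bool),
      (cs.foldl vlB_step (prev, none, f)).2.2 =
        ((f || ((prev == some true) && vlHeadVow (vlWords cs))) || vlPairs (vlWords cs)) := by
  induction hn : cs.length using Nat.strong_induction_on generalizing cs with
  | _ n ih =>
  intro prev f
  subst hn
  conv_lhs => rw [← List.takeWhile_append_dropWhile (p := vlSp) (l := cs)]
  rw [List.foldl_append, vlB_foldl_spaces _ (fun c hc => List.mem_takeWhile_imp hc) prev f]
  by_cases hde : cs.dropWhile vlSp = []
  · have hw0 : vlWords cs = [] := by rw [vlWords, dif_pos hde]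
    rw [hde, hw0]
    simp [vlHeadVow, vlPairs]
  · obtain ⟨c, d2, hdc, hcn⟩ := vl_head_nsp cs hde
    have hwords : vlWords cs = (cs.dropWhile vlSp).takeWhile vlNsp ::
        vlWords ((cs.dropWhile vlSp).dropWhile vlNsp) := by
      rw [vlWords, dif_neg hde]
    have htw : (cs.dropWhile vlSp).takeWhile vlNsp = c :: d2.takeWhile vlNsp := by
      rw [hdc, List.takeWhile_cons, if_pos hcn]
    have hdw : (cs.dropWhile vlSp).dropWhile vlNsp = d2.dropWhile vlNsp := by
      rw [hdc, List.dropWhile_cons, if_pos hcn]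
    have hcns : ¬ c = ' ' := by simp [vlNsp] at hcn; exact hcn
    have hsplit : cs.dropWhile vlSp = (c :: d2.takeWhile vlNsp) ++ d2.dropWhile vlNsp := by
      rw [hdc]; simp [List.takeWhile_append_dropWhile]
    rw [hsplit, List.foldl_append, List.foldl_cons, vlB_step_nonspace_start prev f c hcns,
      vlB_foldl_word (d2.takeWhile vlNsp) (fun x hx => List.mem_takeWhile_imp hx)]
    have hlast : (if hne : d2.takeWhile vlNsp = [] then vlB_isVow c
        else vlB_isVow ((d2.takeWhile vlNsp).getLast hne)) =
        vlVow (vlLast (c :: d2.takeWhile vlNsp)) := by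
      by_cases hne : d2.takeWhile vlNsp = []
      · rw [dif_pos hne, hne]
        unfold vlLast
        rw [PySem.List.pyGetD_neg_one _ _ (by simp)]
        rfl
      · rw [dif_neg hne]
        unfold vlLast
        rw [PySem.List.pyGetD_neg_one _ _ (by simp)]
        rw [List.getLast_cons hne]
        rfl
    rw [hlast]
    have hfirst : vlVow (vlFirst (c :: d2.takeWhile vlNsp)) = vlB_isVow c := by
      unfold vlFirst
      rw [PySem.List.pyGetD_zero_cons]
      rfl
    cases hrc : d2.dropWhile vlNsp with
    | nil =>
      rw [List.foldl_nil, hwords, htw, hdw, hrc, vlWords_nil]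
      simp only [vlPairs, vlHeadVow, hfirst, Bool.and_false, Bool.or_false]
    | cons c2 r2 =>
      have hc2 : c2 = ' ' := by
        have hh := List.head_dropWhile_not vlNsp (l := d2) (by rw [hrc]; simp)
        simp only [hrc, List.head_cons] at hh
        simpa [vlNsp] using hh
      subst hc2
      rw [List.foldl_cons, vlB_step_space_inword]
      have hlen : r2.length < cs.length := by
        have h1 := List.length_dropWhile_le (p := vlSp) (l := cs)
        rw [hdc] at h1
        have h2 := List.length_dropWhile_le (p := vlNsp) (l := d2)
        rw [hrc] at h2
        simp at h1 h2
        omega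
      rw [ih r2.length hlen r2 rfl (some (vlVow (vlLast (c :: d2.takeWhile vlNsp)))) _]
      have hpr : ((some (vlVow (vlLast (c :: d2.takeWhile vlNsp))) : Option Bool) == some true) =
          vlVow (vlLast (c :: d2.takeWhile vlNsp)) := by
        cases vlVow (vlLast (c :: d2.takeWhile vlNsp)) <;> rfl
      rw [hpr]
      have hwr2 : vlWords (' ' :: r2) = vlWords r2 := by
        apply vlWords_eq_of_dropWhile_eq
        simp [List.dropWhile_cons, vlSp]
      rw [hwords, htw, hdw, hrc, hwr2]
      simp only [vlPairs, vlHeadVow, hfirst]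
      cases f <;> cases (prev == some true) <;> cases vlB_isVow c <;>
        cases vlVow (vlLast (c :: d2.takeWhile vlNsp)) <;>
        cases vlHeadVow (vlWords r2) <;> cases vlPairs (vlWords r2) <;> rfl

-- ===== VERDICT (by name: the statement is the Claim_ definition above) =====
theorem vowels_link_spec : Claim_equal_vowels_link := by
  intro text _
  unfold Spec_vowels_link vowels_link vowels_link_alt
  simp only []
  rw [vlA_tokenize_eq text.toList 0 []]
  rw [List.drop_zero, List.nil_append]
  rw [vlA_scan_eq_pairs]
  rw [vlB_main text.toList none false]
  simp
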